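-- pv_equiv track=rewrite | github.com/woohree/ALGO2ITHM_STUDY | baekjoon/5월/0505 좋다 거짓말 플로이드/g4_1043_거짓말/yeonggyeong.py | solution
-- ===== SOURCE A (Python) =====
-- def solution(people, parties):
--     pop_index = []
--     while parties:
--         for idx, party in enumerate(parties):
--             # 진실을 아는 사람들이 가는 파티
--             if set(people) & set(party[1:]):
--                 # 그 파티에 가는 모든 사람들을 포함해주기
--                 people.extend(party[1:])
--                 # 그 파티 삭제
--                 pop_index.append(idx)
--         if not pop_index:
--             break
--         for idx in pop_index[::-1]:
--             parties.pop(idx)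
--             pop_index = []
--     return len(parties)
-- ===== SOURCE B (Python) =====
-- def solution(people, parties):
--     # Graph traversal: index each attendee to the parties they attend, then one
--     # BFS/DFS from the truth-knowers marks every reachable person; count the
--     # parties with no reachable attendee.  (Return value only: unlike A, this
--     # does not mutate `people` or `parties`.)
--     atts = [party[1:] for party in parties]
--     index = {}
--     for i, att in enumerate(atts):
--         for person in att:
--             index.setdefault(person, []).append(i)
--     done = [False] * len(atts)
--     visited = set()
--     stack = list(people)
--     while stack:
--         x = stack.pop()
--         if x in visited:
--             continue
--         visited.add(x)
--         for i in index.get(x, []):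
--             if not done[i]:
--                 done[i] = True
--                 stack.extend(atts[i])
--     return sum(1 for att in atts if visited.isdisjoint(att))
-- ===== Notes on version B (the rewrite author's own statement) =====
-- stated objective: faster
-- what changed: A repeatedly rescans and mutates the party list until a fixed point; B builds a person-to-party index once, runs a single stack-based graph traversal from the truth-knowers to mark all reachable people, and counts unreachable parties in one final pass (B also leaves its arguments unmutated; A mutates both).
import Mathlib
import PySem

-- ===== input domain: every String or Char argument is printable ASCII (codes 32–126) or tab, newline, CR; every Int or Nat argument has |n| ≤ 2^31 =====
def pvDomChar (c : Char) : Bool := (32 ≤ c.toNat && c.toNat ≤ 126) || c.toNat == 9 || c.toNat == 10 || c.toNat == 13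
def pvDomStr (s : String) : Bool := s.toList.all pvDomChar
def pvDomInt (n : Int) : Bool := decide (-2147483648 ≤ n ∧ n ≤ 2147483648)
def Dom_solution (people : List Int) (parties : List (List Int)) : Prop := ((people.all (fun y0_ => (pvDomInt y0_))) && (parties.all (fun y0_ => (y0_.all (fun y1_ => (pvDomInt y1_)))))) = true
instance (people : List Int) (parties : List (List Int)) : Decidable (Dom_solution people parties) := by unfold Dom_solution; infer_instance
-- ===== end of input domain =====

-- B re-implements A's fixed-point rescanning by a one-pass indexed graph traversal (asymptotically
-- faster); equivalence is about the RETURN value only: A mutates `people` and `parties`, B does not.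

-- ===== PORT A =====
-- one pass of A's `for idx, party in enumerate(parties)` loop: returns (people, pop_index)
def aScan (ppl : List Int) (prts : List (List Int)) : List Int × List Int :=
  (PySem.List.enumerate prts 0).foldl
    (fun st ip =>
      if PySem.Set.inter (PySem.Set.ofList st.1) (PySem.Set.ofList (PySem.List.slice ip.2 (some 1) none)) ≠ [] then
        (st.1 ++ PySem.List.slice ip.2 (some 1) none, st.2 ++ [ip.1])
      else st)
    (ppl, ([] : List Int))

-- A's `for idx in pop_index[::-1]: parties.pop(idx)` loop; the `none` branch (IndexError) is
-- unreachable because the indices come from `enumerate(parties)` of the current list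
def aPops (prts : List (List Int)) (idxs : List Int) : List (List Int) :=
  idxs.foldl (fun ps i =>
    match PySem.List.pop? ps i with
    | some r => r.2
    | none => ps) prts

theorem aPops_length_le (idxs : List Int) (prts : List (List Int)) :
    (aPops prts idxs).length ≤ prts.length := by
  induction idxs generalizing prts with
  | nil => simp [aPops]
  | cons i is ih =>
    simp only [aPops, List.foldl_cons]
    rcases h : PySem.List.pop? prts i with _ | r
    · exact ih prts
    · have := PySem.List.length_of_pop?_eq_some prts h
      calc (aPops r.2 is).length ≤ r.2.length := ih r.2
        _ ≤ prts.length := by omega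

theorem aScan_idx_bound (ppl : List Int) (prts : List (List Int)) :
    ∀ i ∈ (aScan ppl prts).2, 0 ≤ i ∧ i < (prts.length : Int) := by
  suffices h : ∀ (prts : List (List Int)) (s : Int) (ppl : List Int) (acc : List Int),
      ∀ i ∈ ((PySem.List.enumerate prts s).foldl
        (fun st ip =>
          if PySem.Set.inter (PySem.Set.ofList st.1) (PySem.Set.ofList (PySem.List.slice ip.2 (some 1) none)) ≠ [] then
            (st.1 ++ PySem.List.slice ip.2 (some 1) none, st.2 ++ [ip.1])
          else st)
        (ppl, acc)).2, i ∈ acc ∨ (s ≤ i ∧ i < s + prts.length) by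
    intro i hi
    rcases h prts 0 ppl [] i hi with h' | h'
    · simp at h'
    · constructor <;> [exact h'.1; omega]
  intro prts
  induction prts with
  | nil => intro s ppl acc i hi; simp [PySem.List.enumerate] at hi; exact .inl hi
  | cons p ps ih =>
    intro s ppl acc i hi
    rw [PySem.List.enumerate_cons, List.foldl_cons] at hi
    by_cases hcond : PySem.Set.inter (PySem.Set.ofList ppl) (PySem.Set.ofList (PySem.List.slice p (some 1) none)) ≠ []
    · rw [if_pos hcond] at hi
      rcases ih (s+1) _ _ i hi with h' | h'
      · rcases List.mem_append.1 h' with h'' | h''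
        · exact .inl h''
        · simp at h''; subst h''; right; simp only [List.length_cons]; push_cast; omega
      · right; simp only [List.length_cons]; push_cast; omega
    · rw [if_neg hcond] at hi
      rcases ih (s+1) _ _ i hi with h' | h'
      · exact .inl h'
      · right; simp only [List.length_cons]; push_cast; omega

theorem aPops_length_lt (prts : List (List Int)) (i : Int) (is : List Int)
    (h0 : 0 ≤ i) (h1 : i < (prts.length : Int)) :
    (aPops prts (i :: is)).length < prts.length := by
  simp only [aPops, List.foldl_cons]
  have hn : i = ((i.toNat : Nat) : Int) := by omega
  have hlt : i.toNat < prts.length := by omega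
  rw [hn, PySem.List.pop?_natCast prts i.toNat hlt]
  have := aPops_length_le is (prts.eraseIdx i.toNat)
  have : (prts.eraseIdx i.toNat).length < prts.length := by
    rw [List.length_eraseIdx_of_lt hlt]; omega
  calc (aPops (prts.eraseIdx i.toNat) is).length ≤ (prts.eraseIdx i.toNat).length :=
        aPops_length_le is _
    _ < prts.length := this

-- A's `while parties:` loop
def aLoop (ppl : List Int) (prts : List (List Int)) : Int :=
  if _hps : prts = [] then (prts.length : Int)
  else
    let st := aScan ppl prts
    if hst : st.2 = [] then (prts.length : Int)
    else aLoop st.1 (aPops prts st.2.reverse)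
termination_by prts.length
decreasing_by
  rcases hr : (aScan ppl prts).2.reverse with _ | ⟨j, rest⟩
  · exact absurd (List.reverse_eq_nil_iff.mp hr) hst
  · have hj : j ∈ (aScan ppl prts).2 := by
      have : j ∈ (aScan ppl prts).2.reverse := by rw [hr]; exact .head _
      simpa using this
    have hb := aScan_idx_bound ppl prts j hj
    exact aPops_length_lt prts j rest hb.1 hb.2

def solution (people : List Int) (parties : List (List Int)) : Int :=
  aLoop people parties

-- ===== PORT B =====
-- the `index.setdefault(person, []).append(i)` loops
def bIndex (atts : List (List Int)) : PySem.Dict Int (List Int) :=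
  (PySem.List.enumerate atts 0).foldl
    (fun d ia => ia.2.foldl (fun d person => d.modify person [] (fun l => l ++ [ia.1])) d)
    PySem.Dict.empty

-- Python's `done[i] = True`: negative indices wrap; out of range would raise (unreachable here)
def pySetBool (l : List Bool) (i : Int) (v : Bool) : List Bool :=
  match PySem.List.pyIdx? l.length i with
  | some k => l.set k v
  | none => l

-- the body of `for i in index.get(x, []):` — threads (done, stack)
def bVisit (atts : List (List Int)) (is : List Int) (st : List Bool × List Int) :
    List Bool × List Int :=
  is.foldl
    (fun s i =>
      if (PySem.List.pyGet? s.1 i).getD true = false then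
        (pySetBool s.1 i true, s.2 ++ (PySem.List.pyGet? atts i).getD [])
      else s) st

theorem count_false_set_true (l : List Bool) (k : Nat) (hk : k < l.length)
    (hf : l[k] = false) : (l.set k true).count false < l.count false := by
  induction l generalizing k with
  | nil => simp at hk
  | cons b bs ih =>
    cases k with
    | zero =>
      simp at hf; subst hf
      simp [List.set]
    | succ k =>
      simp at hk hf
      have := ih k hk hf
      simp [List.set, List.count_cons]
      omega

theorem pyGet?_eq_some_getElem {α : Type} (l : List α) (i : Int) (v : α)
    (h : PySem.List.pyGet? l i = some v) :
    ∃ k, PySem.List.pyIdx? l.length i = some k ∧ ∃ hk : k < l.length, l[k] = v := by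
  unfold PySem.List.pyGet? at h
  rcases hk : PySem.List.pyIdx? l.length i with _ | k
  · rw [hk] at h; simp at h
  · rw [hk] at h; simp at h
    have hlt : k < l.length := by
      by_contra hge
      rw [List.getElem?_eq_none (by omega)] at h
      exact absurd h (by simp)
    refine ⟨k, rfl, hlt, ?_⟩
    rw [List.getElem?_eq_getElem hlt] at h
    simpa using h

theorem bVisit_count_le (atts : List (List Int)) (is : List Int) (st : List Bool × List Int) :
    (bVisit atts is st).1.count false ≤ st.1.count false := by
  induction is generalizing st with
  | nil => simp [bVisit]
  | cons i is ih =>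
    simp only [bVisit, List.foldl_cons]
    by_cases hc : (PySem.List.pyGet? st.1 i).getD true = false
    · rw [if_pos hc]
      refine le_trans (ih _) ?_
      simp only
      rcases hv : PySem.List.pyGet? st.1 i with _ | v
      · rw [hv] at hc; simp at hc
      · rw [hv] at hc; simp at hc; subst hc
        obtain ⟨k, hidx, hk, hget⟩ := pyGet?_eq_some_getElem _ _ _ hv
        unfold pySetBool
        rw [hidx]
        exact le_of_lt (count_false_set_true _ _ hk hget)
    · rw [if_neg hc]; exact ih _

theorem bVisit_decrease (atts : List (List Int)) (is : List Int) (st : List Bool × List Int) :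
    (bVisit atts is st).1.count false < st.1.count false ∨ bVisit atts is st = st := by
  induction is generalizing st with
  | nil => right; simp [bVisit]
  | cons i is ih =>
    simp only [bVisit, List.foldl_cons]
    by_cases hc : (PySem.List.pyGet? st.1 i).getD true = false
    · rw [if_pos hc]
      left
      rcases hv : PySem.List.pyGet? st.1 i with _ | v
      · rw [hv] at hc; simp at hc
      · rw [hv] at hc; simp at hc; subst hc
        obtain ⟨k, hidx, hk, hget⟩ := pyGet?_eq_some_getElem _ _ _ hv
        have h1 : (pySetBool st.1 i true).count false < st.1.count false := by
          unfold pySetBool; rw [hidx]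
          exact count_false_set_true _ _ hk hget
        exact lt_of_le_of_lt (bVisit_count_le atts is _) h1
    · rw [if_neg hc]; exact ih _

-- the `while stack:` loop; `x = stack.pop()` pops the last element
def bLoop (index : PySem.Dict Int (List Int)) (atts : List (List Int))
    (done : List Bool) (visited : PySem.Set Int) (stack : List Int) : PySem.Set Int :=
  if h : stack = [] then visited
  else
    let x := stack.getLast h
    let rest := stack.dropLast
    if PySem.Set.contains visited x then bLoop index atts done visited rest
    else
      let st := bVisit atts (PySem.Dict.getD index x []) (done, rest)
      bLoop index atts st.1 (PySem.Set.add visited x) st.2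
termination_by (done.count false, stack.length)
decreasing_by
  · have hlen : stack.length ≠ 0 := fun h0 => h (List.length_eq_zero_iff.mp h0)
    apply Prod.Lex.right
    rw [List.length_dropLast]
    omega
  · have hlen : stack.length ≠ 0 := fun h0 => h (List.length_eq_zero_iff.mp h0)
    rcases bVisit_decrease atts (PySem.Dict.getD index (stack.getLast h) [])
        (done, stack.dropLast) with hlt | heq
    · exact Prod.Lex.left _ _ hlt
    · rw [heq]
      apply Prod.Lex.right
      rw [List.length_dropLast]
      omega

def solution_alt (people : List Int) (parties : List (List Int)) : Int :=
  let atts := parties.map (fun party => PySem.List.slice party (some 1) none)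
  let index := bIndex atts
  let done := List.replicate atts.length false
  let visited := bLoop index atts done PySem.Set.empty people
  atts.foldl (fun acc att => if PySem.Set.isdisjoint visited att then acc + 1 else acc) (0 : Int)

-- ===== PRECONDITION & SPEC =====
def Spec_solution (people : List Int) (parties : List (List Int)) (out : Int) : Prop := out = solution_alt people parties
instance (people : List Int) (parties : List (List Int)) (out : Int) : Decidable (Spec_solution people parties out) := by unfold Spec_solution; infer_instance

-- ===== CLAIM (what is proved, stated in full; the proofs are below) =====
def Claim_equal_solution : Prop := ∀ (people : List Int) (parties : List (List Int)), Dom_solution people parties → Spec_solution people parties (solution people parties)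


-- ===== LEMMAS AND PROOFS =====

-- the least set of people containing the seeds and closed under attending a common party
inductive pvReach (seeds : List Int) (atts : List (List Int)) : Int → Prop
  | seed {x : Int} : x ∈ seeds → pvReach seeds atts x
  | step {att : List Int} {a b : Int} : att ∈ atts → a ∈ att → pvReach seeds atts a →
      b ∈ att → pvReach seeds atts b

theorem pvReach_absorb {seeds seeds' : List Int} {atts atts' : List (List Int)}
    (hs : ∀ y ∈ seeds', pvReach seeds atts y) (ha : ∀ t ∈ atts', t ∈ atts) :
    ∀ x, pvReach seeds' atts' x → pvReach seeds atts x := by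
  intro x hx
  induction hx with
  | seed hmem => exact hs _ hmem
  | step hatt hmem _ hb ih => exact .step (ha _ hatt) hmem ih hb

theorem pvReach_trivial {seeds : List Int} {atts : List (List Int)}
    (h : ∀ att ∈ atts, ∀ a ∈ att, a ∉ seeds) :
    ∀ x, pvReach seeds atts x → x ∈ seeds := by
  intro x hx
  induction hx with
  | seed hmem => exact hmem
  | step hatt hmem _ _ ih => exact absurd ih (h _ hatt _ hmem)

-- Python's truthiness of `set(people) & set(t)`
def pvHits (ppl t : List Int) : Prop :=
  PySem.Set.inter (PySem.Set.ofList ppl) (PySem.Set.ofList t) ≠ []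

theorem pvHits_iff (ppl t : List Int) : pvHits ppl t ↔ ∃ a, a ∈ t ∧ a ∈ ppl := by
  unfold pvHits
  rw [← List.isEmpty_eq_false_iff, List.isEmpty_eq_false_iff_exists_mem]
  constructor
  · rintro ⟨y, hy⟩
    have := (PySem.Set.mem_inter _ _ _).1 hy
    exact ⟨y, (PySem.Set.mem_ofList _ _).1 this.2, (PySem.Set.mem_ofList _ _).1 this.1⟩
  · rintro ⟨a, hat, hap⟩
    exact ⟨a, (PySem.Set.mem_inter _ _ _).2
      ⟨(PySem.Set.mem_ofList _ _).2 hap, (PySem.Set.mem_ofList _ _).2 hat⟩⟩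

-- structural restatement of one pass of A's scan: final people and a flag per party
def scanR (ppl : List Int) : List (List Int) → List Int × List Bool
  | [] => (ppl, [])
  | p :: ps =>
    if PySem.Set.inter (PySem.Set.ofList ppl) (PySem.Set.ofList (PySem.List.slice p (some 1) none)) ≠ [] then
      let r := scanR (ppl ++ PySem.List.slice p (some 1) none) ps
      (r.1, true :: r.2)
    else
      let r := scanR ppl ps
      (r.1, false :: r.2)

def trueIdxs (s : Int) : List Bool → List Int
  | [] => []
  | true :: bs => s :: trueIdxs (s + 1) bs
  | false :: bs => trueIdxs (s + 1) bs

def keepT : List (List Int) → List Bool → List (List Int)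
  | _, [] => []
  | [], _ => []
  | p :: ps, b :: bs => if b then p :: keepT ps bs else keepT ps bs

def keepF : List (List Int) → List Bool → List (List Int)
  | ps, [] => ps
  | [], _ => []
  | p :: ps, b :: bs => if b then keepF ps bs else p :: keepF ps bs

theorem aScan_eq_scanR (ppl : List Int) (prts : List (List Int)) :
    aScan ppl prts = ((scanR ppl prts).1, trueIdxs 0 (scanR ppl prts).2) := by
  suffices h : ∀ (ps : List (List Int)) (s : Int) (ppl acc : List Int),
      (PySem.List.enumerate ps s).foldl
        (fun st ip =>
          if PySem.Set.inter (PySem.Set.ofList st.1) (PySem.Set.ofList (PySem.List.slice ip.2 (some 1) none)) ≠ [] then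
            (st.1 ++ PySem.List.slice ip.2 (some 1) none, st.2 ++ [ip.1])
          else st)
        (ppl, acc)
      = ((scanR ppl ps).1, acc ++ trueIdxs s (scanR ppl ps).2) by
    have := h prts 0 ppl []
    simpa [aScan] using this
  intro ps
  induction ps with
  | nil => intro s ppl acc; simp [PySem.List.enumerate, scanR, trueIdxs]
  | cons p ps ih =>
    intro s ppl acc
    rw [PySem.List.enumerate_cons, List.foldl_cons]
    by_cases hc : PySem.Set.inter (PySem.Set.ofList ppl) (PySem.Set.ofList (PySem.List.slice p (some 1) none)) ≠ []
    · rw [if_pos hc]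
      rw [ih (s + 1) (ppl ++ PySem.List.slice p (some 1) none) (acc ++ [s])]
      simp [scanR, if_pos hc, trueIdxs]
    · rw [if_neg hc]
      rw [ih (s + 1) ppl acc]
      simp [scanR, if_neg hc, trueIdxs]

theorem trueIdxs_succ (bs : List Bool) : ∀ (s : Int),
    trueIdxs (s + 1) bs = (trueIdxs s bs).map (· + 1) := by
  induction bs with
  | nil => intro s; simp [trueIdxs]
  | cons b bs ih =>
    intro s
    cases b <;> simp [trueIdxs, ih (s + 1), ih s]

theorem trueIdxs_nil_iff (bs : List Bool) : ∀ (s : Int),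
    (trueIdxs s bs = [] ↔ ∀ b ∈ bs, b = false) := by
  induction bs with
  | nil => intro s; simp [trueIdxs]
  | cons b bs ih =>
    intro s
    cases b <;> simp [trueIdxs, ih (s + 1)]

theorem trueIdxs_le (bs : List Bool) : ∀ (s : Int), ∀ i ∈ trueIdxs s bs, s ≤ i := by
  induction bs with
  | nil => intro s i hi; simp [trueIdxs] at hi
  | cons b bs ih =>
    intro s i hi
    cases b with
    | true =>
      simp only [trueIdxs, List.mem_cons] at hi
      rcases hi with rfl | hi
      · omega
      · have := ih (s + 1) i hi; omega
    | false =>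
      simp only [trueIdxs] at hi
      have := ih (s + 1) i hi; omega

theorem pop?_cons_succ {α : Type} (p : α) (ps : List α) (i : Int) (h : 0 ≤ i) :
    PySem.List.pop? (p :: ps) (i + 1) = (PySem.List.pop? ps i).map (fun r => (r.1, p :: r.2)) := by
  unfold PySem.List.pop? PySem.List.pyIdx?
  simp only [List.length_cons]
  rw [if_pos (by omega : (0:Int) ≤ i + 1), if_pos h]
  by_cases hlt : i < (ps.length : Int)
  · rw [if_pos (by push_cast; omega), if_pos hlt]
    have h1 : (i + 1).toNat = i.toNat + 1 := by omega
    rw [h1]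
    simp only [Option.bind_some, List.getElem?_cons_succ, List.eraseIdx_cons_succ]
    cases ps[i.toNat]? <;> simp
  · rw [if_neg (by push_cast; omega), if_neg hlt]
    simp

theorem aPops_shift (idxs : List Int) (h : ∀ i ∈ idxs, 0 ≤ i) :
    ∀ (p : List Int) (ps : List (List Int)),
      aPops (p :: ps) (idxs.map (· + 1)) = p :: aPops ps idxs := by
  induction idxs with
  | nil => intro p ps; simp [aPops]
  | cons i is ih =>
    intro p ps
    have hi : 0 ≤ i := h i (List.mem_cons_self ..)
    simp only [List.map_cons, aPops, List.foldl_cons]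
    rw [pop?_cons_succ p ps i hi]
    cases hp : PySem.List.pop? ps i with
    | none =>
      simpa [aPops] using ih (fun j hj => h j (List.mem_cons_of_mem _ hj)) p ps
    | some r =>
      simpa [aPops] using ih (fun j hj => h j (List.mem_cons_of_mem _ hj)) p r.2

theorem aPops_trueIdxs (ps : List (List Int)) : ∀ (flags : List Bool),
    flags.length = ps.length →
    aPops ps (trueIdxs 0 flags).reverse = keepF ps flags := by
  induction ps with
  | nil =>
    intro flags hl
    rw [List.length_nil, List.length_eq_zero_iff] at hl
    subst hl
    simp [trueIdxs, aPops, keepF]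
  | cons p ps ih =>
    intro flags hl
    cases flags with
    | nil => simp at hl
    | cons b bs =>
      have hbs : bs.length = ps.length := by simpa using hl
      have hnonneg : ∀ i ∈ (trueIdxs 0 bs).reverse, 0 ≤ i := by
        intro i hi
        exact trueIdxs_le bs 0 i (List.mem_reverse.mp hi)
      cases b with
      | false =>
        show aPops (p :: ps) (trueIdxs (0 + 1) bs).reverse = _
        rw [trueIdxs_succ bs 0, ← List.map_reverse]
        rw [aPops_shift _ hnonneg p ps, ih bs hbs]
        simp [keepF]
      | true =>
        show aPops (p :: ps) (0 :: trueIdxs (0 + 1) bs).reverse = _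
        rw [trueIdxs_succ bs 0, List.reverse_cons, ← List.map_reverse]
        show List.foldl _ (p :: ps) (_ ++ [0]) = _
        rw [List.foldl_append]
        have hfront : List.foldl (fun ps i => match PySem.List.pop? ps i with
            | some r => r.2
            | none => ps) (p :: ps) ((trueIdxs 0 bs).reverse.map (· + 1))
            = p :: aPops ps (trueIdxs 0 bs).reverse := by
          have := aPops_shift (trueIdxs 0 bs).reverse hnonneg p ps
          simpa [aPops] using this
        rw [hfront]
        rw [ih bs hbs]
        simp [keepF, PySem.List.pop?_zero_cons]

theorem scanR_length (ppl : List Int) (ps : List (List Int)) :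
    (scanR ppl ps).2.length = ps.length := by
  induction ps generalizing ppl with
  | nil => simp [scanR]
  | cons p ps ih => simp only [scanR]; split_ifs <;> simp [ih]

theorem scanR_extends (ppl : List Int) (ps : List (List Int)) :
    ∀ x ∈ ppl, x ∈ (scanR ppl ps).1 := by
  induction ps generalizing ppl with
  | nil => intro x hx; simpa [scanR] using hx
  | cons p ps ih =>
    intro x hx
    simp only [scanR]
    split_ifs with hc
    · exact ih _ x (List.mem_append_left _ hx)
    · exact ih _ x hx

theorem scanR_sound (R : Int → Prop) (ps : List (List Int)) : ∀ (ppl : List Int),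
    (∀ x ∈ ppl, R x) →
    (∀ p ∈ ps, (∃ a ∈ PySem.List.slice p (some 1) none, R a) →
      ∀ b ∈ PySem.List.slice p (some 1) none, R b) →
    (∀ x ∈ (scanR ppl ps).1, R x) ∧
    (∀ p ∈ keepT ps (scanR ppl ps).2, ∃ a ∈ PySem.List.slice p (some 1) none, R a) := by
  induction ps with
  | nil =>
    intro ppl hseed _
    constructor
    · intro x hx; exact hseed x hx
    · intro p hp; simp [scanR, keepT] at hp
  | cons p ps ih =>
    intro ppl hseed hclosed
    have hcl' : ∀ q ∈ ps, (∃ a ∈ PySem.List.slice q (some 1) none, R a) →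
        ∀ b ∈ PySem.List.slice q (some 1) none, R b :=
      fun q hq => hclosed q (List.mem_cons_of_mem _ hq)
    simp only [scanR]
    split_ifs with hc
    · -- flagged: everybody in p's tail is reachable
      have hhit : ∃ a ∈ PySem.List.slice p (some 1) none, R a := by
        obtain ⟨a, hat, hap⟩ := (pvHits_iff ppl _).1 hc
        exact ⟨a, hat, hseed a hap⟩
      have htail : ∀ b ∈ PySem.List.slice p (some 1) none, R b :=
        hclosed p (List.mem_cons_self ..) hhit
      have hseed' : ∀ x ∈ ppl ++ PySem.List.slice p (some 1) none, R x := by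
        intro x hx
        rcases List.mem_append.1 hx with hx | hx
        · exact hseed x hx
        · exact htail x hx
      obtain ⟨h1, h2⟩ := ih (ppl ++ PySem.List.slice p (some 1) none) hseed' hcl'
      refine ⟨h1, ?_⟩
      intro q hq
      simp only [keepT, if_pos] at hq
      rcases List.mem_cons.1 hq with rfl | hq
      · exact hhit
      · exact h2 q hq
    · obtain ⟨h1, h2⟩ := ih ppl hseed hcl'
      refine ⟨h1, ?_⟩
      intro q hq
      simp only [keepT] at hq
      exact h2 q hq

theorem scanR_flagged_sub (ps : List (List Int)) : ∀ (ppl : List Int),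
    ∀ p ∈ keepT ps (scanR ppl ps).2, ∀ b ∈ PySem.List.slice p (some 1) none,
      b ∈ (scanR ppl ps).1 := by
  induction ps with
  | nil => intro ppl p hp; simp [scanR, keepT] at hp
  | cons p ps ih =>
    intro ppl q hq b hb
    simp only [scanR] at hq ⊢
    split_ifs at hq ⊢ with hc
    · simp only [keepT, if_pos] at hq
      rcases List.mem_cons.1 hq with rfl | hq
      · exact scanR_extends _ _ b (List.mem_append_right _ hb)
      · exact ih _ q hq b hb
    · simp only [keepT] at hq
      exact ih _ q hq b hb

theorem keep_partition (ps : List (List Int)) : ∀ (flags : List Bool),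
    ∀ p ∈ ps, p ∈ keepT ps flags ∨ p ∈ keepF ps flags := by
  induction ps with
  | nil => intro flags p hp; simp at hp
  | cons q ps ih =>
    intro flags p hp
    cases flags with
    | nil => right; simpa [keepF] using hp
    | cons b bs =>
      rcases List.mem_cons.1 hp with rfl | hp
      · cases b
        · right; simp [keepF]
        · left; simp [keepT]
      · cases b
        · rcases ih bs p hp with h | h
          · left; simpa [keepT] using h
          · right; simp [keepF]; right; exact h
        · rcases ih bs p hp with h | h
          · left; simp [keepT]; right; exact h
          · right; simpa [keepF] using h

theorem keepF_sub (ps : List (List Int)) : ∀ (flags : List Bool),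
    ∀ p ∈ keepF ps flags, p ∈ ps := by
  induction ps with
  | nil => intro flags p hp; cases flags <;> simp [keepF] at hp
  | cons q ps ih =>
    intro flags p hp
    cases flags with
    | nil => exact hp
    | cons b bs =>
      cases b with
      | false =>
        simp only [keepF] at hp
        rcases List.mem_cons.1 hp with rfl | hp
        · exact List.mem_cons_self ..
        · exact List.mem_cons_of_mem _ (ih bs p hp)
      | true =>
        simp only [keepF, if_pos] at hp
        exact List.mem_cons_of_mem _ (ih bs p hp)

theorem scanR_allfalse (ps : List (List Int)) : ∀ (ppl : List Int),
    (∀ b ∈ (scanR ppl ps).2, b = false) →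
    (scanR ppl ps).1 = ppl ∧
      ∀ p ∈ ps, ¬ pvHits ppl (PySem.List.slice p (some 1) none) := by
  induction ps with
  | nil => intro ppl _; exact ⟨rfl, by simp⟩
  | cons p ps ih =>
    intro ppl h
    by_cases hc : PySem.Set.inter (PySem.Set.ofList ppl) (PySem.Set.ofList (PySem.List.slice p (some 1) none)) ≠ []
    · exfalso
      have : (true : Bool) ∈ (scanR ppl (p :: ps)).2 := by
        simp only [scanR, if_pos hc]
        exact List.mem_cons_self ..
      exact absurd (h _ this) (by simp)
    · have h' : ∀ b ∈ (scanR ppl ps).2, b = false := by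
        intro b hb
        apply h
        simp only [scanR, if_neg hc]
        exact List.mem_cons_of_mem _ hb
      obtain ⟨h1, h2⟩ := ih ppl h'
      refine ⟨by simp only [scanR, if_neg hc]; exact h1, ?_⟩
      intro q hq
      rcases List.mem_cons.1 hq with rfl | hq
      · exact fun hh => hc hh
      · exact h2 q hq

theorem foldl_count_int {α : Type} (g : α → Bool) (l : List α) : ∀ (c : Int),
    l.foldl (fun acc x => if g x then acc + 1 else acc) c = c + (l.countP g : Int) := by
  induction l with
  | nil => intro c; simp
  | cons x xs ih =>
    intro c
    simp only [List.foldl_cons, List.countP_cons]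
    by_cases hx : g x
    · rw [if_pos hx, ih (c + 1)]
      simp [hx]
      omega
    · rw [if_neg hx, ih c]
      simp [hx]

theorem countP_keep_split (g : List Int → Bool) (ps : List (List Int)) : ∀ (flags : List Bool),
    ps.countP g = (keepT ps flags).countP g + (keepF ps flags).countP g := by
  induction ps with
  | nil => intro flags; cases flags <;> simp [keepT, keepF]
  | cons p ps ih =>
    intro flags
    cases flags with
    | nil => simp [keepT, keepF]
    | cons b bs =>
      cases b with
      | false =>
        simp only [keepT, keepF, Bool.false_eq_true, if_false, List.countP_cons, ih bs]
        omega
      | true =>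
        simp only [keepT, keepF, if_true, List.countP_cons, ih bs]
        omega

-- one round of A preserves the reachable set
theorem reach_step_eq (ppl : List Int) (ps : List (List Int)) (x : Int) :
    pvReach ppl (ps.map (fun p => PySem.List.slice p (some 1) none)) x ↔
      pvReach (scanR ppl ps).1
        ((keepF ps (scanR ppl ps).2).map (fun p => PySem.List.slice p (some 1) none)) x := by
  constructor
  · intro hx
    induction hx with
    | seed hmem => exact .seed (scanR_extends _ _ _ hmem)
    | step hatt hmem hra hb ih =>
      obtain ⟨p, hp, rfl⟩ := List.mem_map.1 hatt
      rcases keep_partition ps (scanR ppl ps).2 p hp with hT | hF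
      · exact .seed (scanR_flagged_sub ps ppl p hT _ hb)
      · exact .step (List.mem_map_of_mem hF) hmem ih hb
  · intro hx
    have hsound := scanR_sound (pvReach ppl (ps.map (fun p => PySem.List.slice p (some 1) none)))
      ps ppl (fun x hx => .seed hx)
      (fun p hp ⟨a, ha, hra⟩ b hb => .step (List.mem_map_of_mem hp) ha hra hb)
    refine pvReach_absorb hsound.1 ?_ x hx
    intro t ht
    obtain ⟨p, hp, rfl⟩ := List.mem_map.1 ht
    exact List.mem_map_of_mem (keepF_sub ps _ p hp)

-- A's loop counts the parties whose attendees avoid the reachable set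
theorem aLoop_eq_count (ppl : List Int) (ps : List (List Int)) :
    ∀ (f : Int → Bool),
    (∀ x, f x = true ↔ pvReach ppl (ps.map (fun p => PySem.List.slice p (some 1) none)) x) →
    aLoop ppl ps =
      ((ps.countP (fun p => (PySem.List.slice p (some 1) none).all (fun a => !f a))) : Int) := by
  induction ppl, ps using aLoop.induct with
  | case1 ppl =>
    intro f hf
    simp [aLoop]
  | case2 ppl ps hps st hst =>
    intro f hf
    have hst' : (aScan ppl ps).2 = [] := hst
    rw [aLoop, dif_neg hps]
    show (if _h : (aScan ppl ps).2 = [] then ((ps.length : Nat) : Int)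
      else aLoop (aScan ppl ps).1 (aPops ps (aScan ppl ps).2.reverse)) = _
    rw [dif_pos hst']
    -- no party hits: every tail is disjoint from the reachable set
    have hflags : ∀ b ∈ (scanR ppl ps).2, b = false := by
      rw [aScan_eq_scanR ppl ps] at hst'
      exact (trueIdxs_nil_iff _ 0).1 hst'
    obtain ⟨_, hnohit⟩ := scanR_allfalse ps ppl hflags
    have hdisj : ∀ att ∈ ps.map (fun p => PySem.List.slice p (some 1) none),
        ∀ a ∈ att, a ∉ ppl := by
      intro att hatt a ha hain
      obtain ⟨p, hp, rfl⟩ := List.mem_map.1 hatt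
      exact hnohit p hp ((pvHits_iff _ _).2 ⟨a, ha, hain⟩)
    have hcnt : ps.countP (fun p => (PySem.List.slice p (some 1) none).all (fun a => !f a))
        = ps.length := by
      rw [List.countP_eq_length]
      intro p hp
      rw [List.all_eq_true]
      intro a ha
      simp only [Bool.not_eq_eq_eq_not, Bool.not_true]
      by_contra hfa
      have hfa' : f a = true := by
        cases hfa0 : f a
        · exact absurd hfa0 hfa
        · rfl
      have hr := (hf a).1 hfa'
      have hin := pvReach_trivial hdisj a hr
      exact hnohit p hp ((pvHits_iff _ _).2 ⟨a, ha, hin⟩)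
    rw [hcnt]
  | case3 ppl ps hps st hst ih =>
    intro f hf
    have hst' : ¬(aScan ppl ps).2 = [] := hst
    rw [aLoop, dif_neg hps]
    show (if _h : (aScan ppl ps).2 = [] then ((ps.length : Nat) : Int)
      else aLoop (aScan ppl ps).1 (aPops ps (aScan ppl ps).2.reverse)) = _
    rw [dif_neg hst']
    have hbr := aScan_eq_scanR ppl ps
    have h1 : (aScan ppl ps).1 = (scanR ppl ps).1 := by rw [hbr]
    have h2 : (aScan ppl ps).2 = trueIdxs 0 (scanR ppl ps).2 := by rw [hbr]
    have hpops : aPops ps (aScan ppl ps).2.reverse = keepF ps (scanR ppl ps).2 := by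
      rw [h2]
      exact aPops_trueIdxs ps (scanR ppl ps).2 (scanR_length ppl ps)
    have hf' : ∀ x, f x = true ↔
        pvReach (aScan ppl ps).1
          ((aPops ps (aScan ppl ps).2.reverse).map (fun p => PySem.List.slice p (some 1) none)) x := by
      rw [h1, hpops]
      intro x
      rw [hf x]
      exact reach_step_eq ppl ps x
    have ih' := ih f hf'
    rw [h1, hpops] at ih'
    rw [h1, hpops, ih']
    -- the flagged parties are hit, so they contribute 0 to the count
    have hT0 : (keepT ps (scanR ppl ps).2).countP
        (fun p => (PySem.List.slice p (some 1) none).all (fun a => !f a)) = 0 := by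
      rw [List.countP_eq_zero]
      intro p hp
      have hsound := scanR_sound (pvReach ppl (ps.map (fun p => PySem.List.slice p (some 1) none)))
        ps ppl (fun x hx => .seed hx)
        (fun q hq ⟨a, ha, hra⟩ b hb => .step (List.mem_map_of_mem hq) ha hra hb)
      obtain ⟨a, ha, hra⟩ := hsound.2 p hp
      have hfa : f a = true := (hf a).2 hra
      simp only [List.all_eq_true, not_forall]
      refine ⟨a, ?_⟩
      simp [ha, hfa]
    have hsplit := countP_keep_split (fun p => (PySem.List.slice p (some 1) none).all (fun a => !f a))
      ps (scanR ppl ps).2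
    rw [hsplit, hT0]
    omega

-- characterization of B's index
theorem bInner_mem (persons : List Int) (i0 : Int) : ∀ (d : PySem.Dict Int (List Int)) (x i : Int),
    i ∈ (persons.foldl (fun d person => d.modify person [] (fun l => l ++ [i0])) d).getD x []
      ↔ i ∈ d.getD x [] ∨ (x ∈ persons ∧ i = i0) := by
  induction persons with
  | nil => intro d x i; simp
  | cons q qs ih =>
    intro d x i
    simp only [List.foldl_cons]
    rw [ih]
    rw [PySem.Dict.getD_modify]
    by_cases hx : x = q
    · subst hx
      rw [if_pos rfl]
      constructor
      · rintro (h | ⟨hq, hi⟩)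
        · rcases List.mem_append.1 h with h' | h'
          · exact .inl h'
          · simp only [List.mem_singleton] at h'
            exact .inr ⟨List.mem_cons_self .., h'⟩
        · exact .inr ⟨List.mem_cons_of_mem _ hq, hi⟩
      · rintro (h | ⟨_, hi⟩)
        · exact .inl (List.mem_append_left _ h)
        · subst hi
          exact .inl (List.mem_append_right _ (List.mem_singleton.2 rfl))
    · rw [if_neg hx]
      constructor
      · rintro (h | ⟨hq, hi⟩)
        · exact .inl h
        · exact .inr ⟨List.mem_cons_of_mem _ hq, hi⟩
      · rintro (h | ⟨hq, hi⟩)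
        · exact .inl h
        · rcases List.mem_cons.1 hq with h' | h'
          · exact absurd h' hx
          · exact .inr ⟨h', hi⟩

def pvIdxOk (index : PySem.Dict Int (List Int)) (atts : List (List Int)) : Prop :=
  ∀ x i, i ∈ index.getD x [] ↔ ∃ k : Nat, ∃ _ : k < atts.length, i = (k : Int) ∧ x ∈ atts[k]

theorem bIndex_ok (atts : List (List Int)) : pvIdxOk (bIndex atts) atts := by
  suffices h : ∀ (ats : List (List Int)) (s : Int) (d : PySem.Dict Int (List Int)) (x i : Int),
      i ∈ ((PySem.List.enumerate ats s).foldl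
        (fun d ia => ia.2.foldl (fun d person => d.modify person [] (fun l => l ++ [ia.1])) d)
        d).getD x []
      ↔ i ∈ d.getD x [] ∨ ∃ k : Nat, ∃ _ : k < ats.length, i = s + (k : Int) ∧ x ∈ ats[k] by
    intro x i
    unfold bIndex
    rw [h atts 0 PySem.Dict.empty x i]
    simp [PySem.Dict.getD_empty]
  intro ats
  induction ats with
  | nil => intro s d x i; simp [PySem.List.enumerate]
  | cons att ats ih =>
    intro s d x i
    rw [PySem.List.enumerate_cons, List.foldl_cons]
    rw [ih (s + 1)]
    rw [bInner_mem]
    constructor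
    · rintro ((h | ⟨hx, hi⟩) | ⟨k, hk, hi, hx⟩)
      · exact .inl h
      · exact .inr ⟨0, by simp, by simpa using hi, by simpa using hx⟩
      · exact .inr ⟨k + 1, by simpa using hk, by push_cast; omega, by simpa using hx⟩
    · rintro (h | ⟨k, hk, hi, hx⟩)
      · exact .inl (.inl h)
      · cases k with
        | zero => exact .inl (.inr ⟨by simpa using hx, by simpa using hi⟩)
        | succ k =>
          refine .inr ⟨k, by simpa using hk, by push_cast at hi ⊢; omega, by simpa using hx⟩

-- properties of the inner `for i in index.get(x, [])` fold
theorem getElem?_set_true (l : List Bool) (j k : Nat) (h : l[k]? = some true) :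
    (l.set j true)[k]? = some true := by
  by_cases hjk : j = k
  · subst hjk
    have hlt : j < l.length := by
      by_contra hge
      rw [List.getElem?_eq_none (by omega)] at h
      simp at h
    simp [hlt]
  · rw [List.getElem?_set_ne hjk]
    exact h

theorem pySetBool_get_true (l : List Bool) (i : Int) (k : Nat) (h : l[k]? = some true) :
    (pySetBool l i true)[k]? = some true := by
  unfold pySetBool
  cases hj : PySem.List.pyIdx? l.length i with
  | none => exact h
  | some j => exact getElem?_set_true l j k h

theorem bVisit_nil (atts : List (List Int)) (st : List Bool × List Int) :
    bVisit atts [] st = st := rfl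

theorem bVisit_cons (atts : List (List Int)) (i : Int) (is : List Int)
    (st : List Bool × List Int) :
    bVisit atts (i :: is) st = bVisit atts is
      (if (PySem.List.pyGet? st.1 i).getD true = false then
        (pySetBool st.1 i true, st.2 ++ (PySem.List.pyGet? atts i).getD [])
      else st) := rfl

theorem pySetBool_length (l : List Bool) (i : Int) (v : Bool) :
    (pySetBool l i v).length = l.length := by
  unfold pySetBool
  cases PySem.List.pyIdx? l.length i <;> simp

theorem bVisit_length (atts : List (List Int)) (is : List Int) : ∀ (st : List Bool × List Int),
    (bVisit atts is st).1.length = st.1.length := by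
  induction is with
  | nil => intro st; rw [bVisit_nil]
  | cons i is ih =>
    intro st
    rw [bVisit_cons]
    by_cases hc : (PySem.List.pyGet? st.1 i).getD true = false
    · rw [if_pos hc, ih]
      exact pySetBool_length st.1 i true
    · rw [if_neg hc, ih]

theorem bVisit_mono (atts : List (List Int)) (is : List Int) : ∀ (st : List Bool × List Int)
    (k : Nat), st.1[k]? = some true → (bVisit atts is st).1[k]? = some true := by
  induction is with
  | nil => intro st k hk; rw [bVisit_nil]; exact hk
  | cons i is ih =>
    intro st k hk
    rw [bVisit_cons]
    by_cases hc : (PySem.List.pyGet? st.1 i).getD true = false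
    · rw [if_pos hc]
      exact ih _ k (pySetBool_get_true st.1 i k hk)
    · rw [if_neg hc]; exact ih st k hk

theorem bVisit_stack_mono (atts : List (List Int)) (is : List Int) : ∀ (st : List Bool × List Int),
    ∀ y ∈ st.2, y ∈ (bVisit atts is st).2 := by
  induction is with
  | nil => intro st y hy; rw [bVisit_nil]; exact hy
  | cons i is ih =>
    intro st y hy
    rw [bVisit_cons]
    by_cases hc : (PySem.List.pyGet? st.1 i).getD true = false
    · rw [if_pos hc]
      exact ih _ y (List.mem_append_left _ hy)
    · rw [if_neg hc]; exact ih st y hy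

theorem bVisit_processed (atts : List (List Int)) (is : List Int) : ∀ (st : List Bool × List Int)
    (k : Nat), k < st.1.length → (k : Int) ∈ is → (bVisit atts is st).1[k]? = some true := by
  induction is with
  | nil => intro st k hk hik; simp at hik
  | cons i is ih =>
    intro st k hk hik
    rw [bVisit_cons]
    rcases List.mem_cons.1 hik with hk0 | hik'
    · -- this element processes index k
      have hidx : PySem.List.pyIdx? st.1.length (k : Int) = some k := by
        unfold PySem.List.pyIdx?
        rw [if_pos (by omega), if_pos (by exact_mod_cast hk)]
        simp
      by_cases hc : (PySem.List.pyGet? st.1 i).getD true = false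
      · rw [if_pos hc]
        apply bVisit_mono
        show (pySetBool st.1 i true)[k]? = some true
        rw [← hk0]
        unfold pySetBool
        rw [hidx]
        simp [hk]
      · rw [if_neg hc]
        apply bVisit_mono
        rw [← hk0, PySem.List.pyGet?_natCast, List.getElem?_eq_getElem hk] at hc
        simp only [Option.getD_some] at hc
        rw [List.getElem?_eq_getElem hk]
        cases hv : st.1[k]
        · rw [hv] at hc; simp at hc
        · rfl
    · by_cases hc : (PySem.List.pyGet? st.1 i).getD true = false
      · rw [if_pos hc]
        apply ih _ k _ hik'
        show k < (pySetBool st.1 i true).length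
        rw [pySetBool_length]
        exact hk
      · rw [if_neg hc]; exact ih st k hk hik'

theorem bVisit_stack_new (atts : List (List Int)) (is : List Int)
    (his : ∀ i ∈ is, 0 ≤ i) : ∀ (st : List Bool × List Int),
    ∀ y ∈ (bVisit atts is st).2, y ∈ st.2 ∨
      ∃ k : Nat, ∃ _ : k < atts.length, (k : Int) ∈ is ∧ y ∈ atts[k] := by
  induction is with
  | nil => intro st y hy; rw [bVisit_nil] at hy; exact .inl hy
  | cons i is ih =>
    intro st y hy
    have his' : ∀ j ∈ is, 0 ≤ j := fun j hj => his j (List.mem_cons_of_mem _ hj)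
    rw [bVisit_cons] at hy
    by_cases hc : (PySem.List.pyGet? st.1 i).getD true = false
    · rw [if_pos hc] at hy
      rcases ih his' _ y hy with hrest | ⟨k, hk, hik, hyk⟩
      · rcases List.mem_append.1 hrest with h | h
        · exact .inl h
        · -- y came from atts[i]
          cases hga : PySem.List.pyGet? atts i with
          | none => rw [hga] at h; simp at h
          | some att =>
            rw [hga] at h
            simp only [Option.getD_some] at h
            obtain ⟨k, hkidx, hklt, hkget⟩ := pyGet?_eq_some_getElem atts i att hga
            have hi0 : 0 ≤ i := his i (List.mem_cons_self ..)
            have hik : i = (k : Int) := by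
              unfold PySem.List.pyIdx? at hkidx
              rw [if_pos hi0] at hkidx
              by_cases hlt : i < (atts.length : Int)
              · rw [if_pos hlt] at hkidx
                simp at hkidx
                omega
              · rw [if_neg hlt] at hkidx
                simp at hkidx
            refine .inr ⟨k, hklt, ?_, ?_⟩
            · rw [← hik]; exact List.mem_cons_self ..
            · rwa [hkget]
      · exact .inr ⟨k, hk, List.mem_cons_of_mem _ hik, hyk⟩
    · rw [if_neg hc] at hy
      rcases ih his' st y hy with h | ⟨k, hk, hik, hyk⟩
      · exact .inl h
      · exact .inr ⟨k, hk, List.mem_cons_of_mem _ hik, hyk⟩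

theorem bVisit_done_new (atts : List (List Int)) (is : List Int)
    (his : ∀ i ∈ is, 0 ≤ i) : ∀ (st : List Bool × List Int),
    st.1.length = atts.length →
    ∀ (k : Nat) (hk : k < atts.length), (bVisit atts is st).1[k]? = some true →
    st.1[k]? = some true ∨ ∀ b ∈ atts[k], b ∈ (bVisit atts is st).2 := by
  induction is with
  | nil => intro st _ k _ hres; rw [bVisit_nil] at hres; exact .inl hres
  | cons i is ih =>
    intro st hlen k hk hres
    have his' : ∀ j ∈ is, 0 ≤ j := fun j hj => his j (List.mem_cons_of_mem _ hj)
    have hi0 : 0 ≤ i := his i (List.mem_cons_self ..)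
    rw [bVisit_cons] at hres ⊢
    by_cases hc : (PySem.List.pyGet? st.1 i).getD true = false
    · rw [if_pos hc] at hres ⊢
      set st' : List Bool × List Int :=
        (pySetBool st.1 i true, st.2 ++ (PySem.List.pyGet? atts i).getD []) with hst'
      have hlen' : st'.1.length = atts.length := by
        rw [hst']
        show (pySetBool st.1 i true).length = atts.length
        rw [pySetBool_length]
        exact hlen
      rcases ih his' st' hlen' k hk hres with hprev | hall
      · -- done[k] already true after this step: either true before or set by this step
        rw [hst'] at hprev
        show _ ∨ ∀ b ∈ atts[k], b ∈ (bVisit atts is st').2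
        unfold pySetBool at hprev
        cases hj : PySem.List.pyIdx? st.1.length i with
        | none => rw [hj] at hprev; exact .inl hprev
        | some j =>
          rw [hj] at hprev
          by_cases hjk : j = k
          · subst hjk
            -- this step set done[j]; then it appended atts[j] to the stack
            have hij : i = (j : Int) := by
              unfold PySem.List.pyIdx? at hj
              rw [if_pos hi0] at hj
              by_cases hlt : i < (st.1.length : Int)
              · rw [if_pos hlt] at hj; simp at hj; omega
              · rw [if_neg hlt] at hj; simp at hj
            right
            intro b hb
            apply bVisit_stack_mono
            rw [hst']
            show b ∈ st.2 ++ (PySem.List.pyGet? atts i).getD []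
            apply List.mem_append_right
            rw [hij, PySem.List.pyGet?_natCast, List.getElem?_eq_getElem hk]
            simpa using hb
          · rw [List.getElem?_set_ne hjk] at hprev
            exact .inl hprev
      · exact .inr hall
    · rw [if_neg hc] at hres ⊢
      exact ih his' st hlen k hk hres

theorem set_mem_add (s : PySem.Set Int) (x y : Int) :
    y ∈ PySem.Set.add s x ↔ y ∈ s ∨ y = x := by
  unfold PySem.Set.add
  split_ifs with hc
  · have hx : x ∈ s := (PySem.Set.contains_iff s x).1 hc
    constructor
    · exact Or.inl
    · rintro (h | rfl)
      · exact h
      · exact hx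
  · simp [List.mem_append]

-- the main invariant argument for B's traversal
theorem bLoop_correct (seeds : List Int) :
    ∀ (index : PySem.Dict Int (List Int)) (atts : List (List Int))
      (done : List Bool) (visited : PySem.Set Int) (stack : List Int),
    pvIdxOk index atts →
    done.length = atts.length →
    (∀ x ∈ visited, pvReach seeds atts x) →
    (∀ x ∈ stack, pvReach seeds atts x) →
    (∀ k (_ : k < atts.length), done[k]? = some true → ∀ b ∈ atts[k], b ∈ visited ∨ b ∈ stack) →
    (∀ x ∈ visited, ∀ k (_ : k < atts.length), x ∈ atts[k] → done[k]? = some true) →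
    (∀ x ∈ seeds, x ∈ visited ∨ x ∈ stack) →
    ∀ x, x ∈ bLoop index atts done visited stack ↔ pvReach seeds atts x := by
  intro index atts done visited stack
  induction done, visited, stack using bLoop.induct index atts with
  | case1 done visited =>
    intro hidx hlen hIv hIs hI2 hI3 hI4 x
    rw [bLoop, dif_pos rfl]
    constructor
    · exact hIv x
    · intro hx
      induction hx with
      | seed hmem =>
        rcases hI4 _ hmem with h | h
        · exact h
        · simp at h
      | step hatt hmem hra hb ih =>
        obtain ⟨k, hk, rfl⟩ := List.mem_iff_getElem.1 hatt
        have hdone := hI3 _ ih k hk hmem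
        rcases hI2 k hk hdone _ hb with h | h
        · exact h
        · simp at h
  | case2 done visited stack hstk xl rl hcont ih =>
    intro hidx hlen hIv hIs hI2 hI3 hI4 x
    have hcont' : PySem.Set.contains visited (stack.getLast hstk) = true := hcont
    rw [bLoop, dif_neg hstk]
    show x ∈ (if PySem.Set.contains visited (stack.getLast hstk) = true
        then bLoop index atts done visited stack.dropLast
        else bLoop index atts
          (bVisit atts (PySem.Dict.getD index (stack.getLast hstk) []) (done, stack.dropLast)).1
          (PySem.Set.add visited (stack.getLast hstk))
          (bVisit atts (PySem.Dict.getD index (stack.getLast hstk) []) (done, stack.dropLast)).2) ↔ _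
    rw [if_pos hcont']
    have hlastv : stack.getLast hstk ∈ visited :=
      (PySem.Set.contains_iff _ _).1 hcont'
    have hmem_stack : ∀ y ∈ stack, y ∈ visited ∨ y ∈ stack.dropLast := by
      intro y hy
      rw [← List.dropLast_append_getLast hstk] at hy
      rcases List.mem_append.1 hy with h | h
      · exact .inr h
      · simp only [List.mem_singleton] at h
        subst h
        exact .inl hlastv
    apply ih hidx hlen hIv
    · intro y hy
      exact hIs y ((List.dropLast_sublist stack).subset hy)
    · intro k hk hdone b hb
      rcases hI2 k hk hdone b hb with h | h
      · exact .inl h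
      · exact hmem_stack b h
    · exact hI3
    · intro y hy
      rcases hI4 y hy with h | h
      · exact .inl h
      · exact hmem_stack y h
  | case3 done visited stack hstk xl rl hcont stv ih =>
    intro hidx hlen hIv hIs hI2 hI3 hI4 x
    have hcont' : ¬ PySem.Set.contains visited (stack.getLast hstk) = true := hcont
    rw [bLoop, dif_neg hstk]
    show x ∈ (if PySem.Set.contains visited (stack.getLast hstk) = true
        then bLoop index atts done visited stack.dropLast
        else bLoop index atts
          (bVisit atts (PySem.Dict.getD index (stack.getLast hstk) []) (done, stack.dropLast)).1
          (PySem.Set.add visited (stack.getLast hstk))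
          (bVisit atts (PySem.Dict.getD index (stack.getLast hstk) []) (done, stack.dropLast)).2) ↔ _
    rw [if_neg hcont']
    have hxstack : stack.getLast hstk ∈ stack := List.getLast_mem hstk
    have hxR : pvReach seeds atts (stack.getLast hstk) := hIs _ hxstack
    set xv := stack.getLast hstk with hxv
    set is := PySem.Dict.getD index xv [] with his_def
    have his0 : ∀ i ∈ is, 0 ≤ i := by
      intro i hi
      obtain ⟨k, hk, hik, _⟩ := (hidx xv i).1 hi
      omega
    have hmem_stack : ∀ y ∈ stack, y = xv ∨ y ∈ stack.dropLast := by
      intro y hy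
      rw [← List.dropLast_append_getLast hstk] at hy
      rcases List.mem_append.1 hy with h | h
      · exact .inr h
      · simp only [List.mem_singleton] at h
        exact .inl h
    apply ih hidx
    · rw [bVisit_length]
      exact hlen
    · intro y hy
      rcases (set_mem_add visited xv y).1 hy with h | rfl
      · exact hIv y h
      · exact hxR
    · intro y hy
      rcases bVisit_stack_new atts is his0 (done, stack.dropLast) y hy with h | ⟨k, hk, hik, hyk⟩
      · exact hIs y ((List.dropLast_sublist stack).subset h)
      · obtain ⟨k', hk', hkk, hxk⟩ := (hidx xv (k : Int)).1 hik
        have hkeq : k' = k := by omega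
        subst hkeq
        exact .step (List.getElem_mem hk') hxk hxR hyk
    · intro k hk hdone b hb
      rcases bVisit_done_new atts is his0 (done, stack.dropLast) hlen k hk hdone with hprev | hall
      · rcases hI2 k hk hprev b hb with h | h
        · exact .inl ((set_mem_add visited xv b).2 (.inl h))
        · rcases hmem_stack b h with h' | h'
          · exact .inl ((set_mem_add visited xv b).2 (.inr h'))
          · exact .inr (bVisit_stack_mono atts is (done, stack.dropLast) b h')
      · exact .inr (hall b hb)
    · intro y hy k hk hyk
      rcases (set_mem_add visited xv y).1 hy with h | rfl
      · exact bVisit_mono atts is _ k (hI3 y h k hk hyk)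
      · have hkin : (k : Int) ∈ is := by
          rw [his_def]
          exact (hidx xv (k : Int)).2 ⟨k, hk, rfl, hyk⟩
        exact bVisit_processed atts is (done, stack.dropLast) k
          (by show k < done.length; omega) hkin
    · intro y hy
      rcases hI4 y hy with h | h
      · exact .inl ((set_mem_add visited xv y).2 (.inl h))
      · rcases hmem_stack y h with h' | h'
        · exact .inl ((set_mem_add visited xv y).2 (.inr h'))
        · exact .inr (bVisit_stack_mono atts is (done, stack.dropLast) y h')

theorem isdisjoint_eq_all (s t : List Int) :
    PySem.Set.isdisjoint s t = t.all (fun a => !PySem.Set.contains s a) := by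
  rw [Bool.eq_iff_iff]
  simp only [PySem.Set.isdisjoint, Bool.not_eq_true', List.any_eq_false, List.all_eq_true,
    Bool.not_eq_true]
  constructor
  · intro h a hat
    cases hx : PySem.Set.contains s a with
    | false => rfl
    | true =>
      have has : a ∈ s := (PySem.Set.contains_iff s a).1 hx
      have := h a has
      rw [(PySem.Set.contains_iff t a).2 hat] at this
      simp at this
  · intro h x hxs
    cases hx : PySem.Set.contains t x with
    | false => rfl
    | true =>
      have hxt : x ∈ t := (PySem.Set.contains_iff t x).1 hx
      have := h x hxt
      rw [(PySem.Set.contains_iff s x).2 hxs] at this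
      simp at this

theorem final_eq (people : List Int) (parties : List (List Int)) :
    solution people parties = solution_alt people parties := by
  unfold solution solution_alt
  show aLoop people parties =
    (parties.map (fun party => PySem.List.slice party (some 1) none)).foldl
      (fun acc att => if PySem.Set.isdisjoint
          (bLoop (bIndex (parties.map (fun party => PySem.List.slice party (some 1) none)))
            (parties.map (fun party => PySem.List.slice party (some 1) none))
            (List.replicate (parties.map (fun party => PySem.List.slice party (some 1) none)).length false)
            PySem.Set.empty people) att then acc + 1 else acc) (0 : Int)
  set atts := parties.map (fun party => PySem.List.slice party (some 1) none) with hatts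
  set V := bLoop (bIndex atts) atts (List.replicate atts.length false) PySem.Set.empty people
    with hVdef
  have hVc : ∀ x, x ∈ V ↔ pvReach people atts x := by
    rw [hVdef]
    apply bLoop_correct people (bIndex atts) atts _ _ _ (bIndex_ok atts)
    · simp
    · intro x hx
      exact absurd hx (List.not_mem_nil)
    · intro x hx
      exact .seed hx
    · intro k hk hdone
      rw [List.getElem?_replicate] at hdone
      split_ifs at hdone
      all_goals simp at hdone
    · intro x hx
      exact absurd hx (List.not_mem_nil)
    · intro x hx
      exact .inr hx
  have hA := aLoop_eq_count people parties (fun a => PySem.Set.contains V a)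
    (fun x => (PySem.Set.contains_iff V x).trans (hVc x))
  rw [foldl_count_int, zero_add, List.countP_map, hA]
  congr 1
  apply List.countP_congr
  intro p hp
  simp [Function.comp, isdisjoint_eq_all]

-- ===== VERDICT (by name: the statement is the Claim_ definition above) =====
theorem solution_spec : Claim_equal_solution := by
  intro people parties _
  exact final_eq people parties
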